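-- pv_equiv track=rewrite | github.com/AAYUSHIP378/Hate-speech-detector | app/utils.py | rule_based_hate
-- ===== SOURCE A (Python) =====
-- def rule_based_hate(text: str):
--
--     hate_words = [
--         "kill",
--         "terrorist",
--         "rapist",
--         "dirty",
--         "slave",
--         "hate",
--         "bloody",
--         "pig",
--         "maar dungi"
--     ]
--
--     text = text.lower()
--
--     for w in hate_words:
--         if w in text:
--             return True
--
--     return False
-- ===== SOURCE B (Python) =====
-- def rule_based_hate(text: str):
--     # first-character dispatch: for each position, look up the (unique) hate word
--     # starting with that character and check its remaining suffix there
--     suffix_by_first = {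
--         'k': "ill", 't': "errorist", 'r': "apist", 'd': "irty",
--         's': "lave", 'h': "ate", 'b': "loody", 'p': "ig", 'm': "aar dungi",
--     }
--     t = text.lower()
--     for i, ch in enumerate(t):
--         suf = suffix_by_first.get(ch)
--         if suf is not None and t.startswith(suf, i + 1):
--             return True
--     return False
-- ===== Notes on version B (the rewrite author's own statement) =====
-- stated objective: alternative
-- what changed: Replaces A's per-word early-exit loop of nine separate substring scans by one left-to-right pass that dispatches on each character through a first-letter lookup table (the nine words have distinct first letters) and checks only that word's suffix at the position.
import Mathlib
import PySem

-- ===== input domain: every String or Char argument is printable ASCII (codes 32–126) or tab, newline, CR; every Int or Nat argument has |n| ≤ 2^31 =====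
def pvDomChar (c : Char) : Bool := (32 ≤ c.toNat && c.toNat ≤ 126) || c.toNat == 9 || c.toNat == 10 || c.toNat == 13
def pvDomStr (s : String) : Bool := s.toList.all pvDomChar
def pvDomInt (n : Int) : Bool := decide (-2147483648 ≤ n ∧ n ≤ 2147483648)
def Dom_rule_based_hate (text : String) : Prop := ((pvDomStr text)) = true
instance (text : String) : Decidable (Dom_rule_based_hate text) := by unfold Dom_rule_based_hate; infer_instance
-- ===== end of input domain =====

-- B replaces A's per-word substring scans by a single pass with a first-letter
-- dispatch table (the nine words have distinct first letters), checking only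
-- that word's suffix at each position (alternative).


-- ===== PORT A =====
-- A's word list, in order
def hateWordsA : List (List Char) :=
  ["kill".toList, "terrorist".toList, "rapist".toList, "dirty".toList, "slave".toList,
   "hate".toList, "bloody".toList, "pig".toList, "maar dungi".toList]

-- A's loop: for w in hate_words: if w in text: return True; return False
def aLoop : List (List Char) → List Char → Bool
  | [], _ => false
  | w :: ws, t => if PySem.Chars.isIn w t then true else aLoop ws t

def rule_based_hate (text : String) : Bool :=
  aLoop hateWordsA (PySem.Chars.lower text.toList)

-- ===== PORT B =====
-- B's dispatch table: suffix_by_first.get(ch), then t.startswith(suf, i+1)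
def dispatch (c : Char) (rest : List Char) : Bool :=
  match c with
  | 'k' => "ill".toList.isPrefixOf rest
  | 't' => "errorist".toList.isPrefixOf rest
  | 'r' => "apist".toList.isPrefixOf rest
  | 'd' => "irty".toList.isPrefixOf rest
  | 's' => "lave".toList.isPrefixOf rest
  | 'h' => "ate".toList.isPrefixOf rest
  | 'b' => "loody".toList.isPrefixOf rest
  | 'p' => "ig".toList.isPrefixOf rest
  | 'm' => "aar dungi".toList.isPrefixOf rest
  | _ => false

-- B's single pass over the lowered text
def bScan : List Char → Bool
  | [] => false
  | c :: rest => dispatch c rest || bScan rest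

def rule_based_hate_alt (text : String) : Bool :=
  bScan (PySem.Chars.lower text.toList)

-- ===== PRECONDITION & SPEC =====
def Spec_rule_based_hate (text : String) (out : Bool) : Prop := out = rule_based_hate_alt text
instance (text : String) (out : Bool) : Decidable (Spec_rule_based_hate text out) := by unfold Spec_rule_based_hate; infer_instance

-- ===== CLAIM (what is proved, stated in full; the proofs are below) =====
def Claim_equal_rule_based_hate : Prop := ∀ (text : String), Dom_rule_based_hate text → Spec_rule_based_hate text (rule_based_hate text)

-- ===== LEMMAS AND PROOFS =====

-- 'w in (c :: t)' splits into 'w starts at position 0' or 'w in t'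
theorem isIn_cons (w : List Char) (c : Char) (t : List Char) :
    PySem.Chars.isIn w (c :: t) = (w.isPrefixOf (c :: t) || PySem.Chars.isIn w t) := by
  rw [Bool.eq_iff_iff]
  simp [PySem.Chars.isIn_iff_infix, List.isPrefixOf_iff_prefix, List.infix_cons_iff]

-- A's loop is an 'any' over the word list
theorem aLoop_eq_any (ws : List (List Char)) (t : List Char) :
    aLoop ws t = ws.any (fun w => PySem.Chars.isIn w t) := by
  induction ws with
  | nil => rfl
  | cons w ws ih =>
    simp only [aLoop, List.any_cons, ih]
    split_ifs with h <;> simp [h]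

-- the dispatch at a position equals "some word starts here" (first letters are distinct)
theorem dispatch_eq_any (c : Char) (rest : List Char) :
    dispatch c rest = hateWordsA.any (fun w => w.isPrefixOf (c :: rest)) := by
  unfold dispatch
  split <;> simp_all [hateWordsA, List.isPrefixOf]
  refine ⟨?_, ?_, ?_, ?_, ?_, ?_, ?_, ?_, ?_⟩ <;> intro h <;> subst h <;> simp_all

-- 'any' distributes over a pointwise disjunction
theorem any_orB {a : Type} (ws : List a) (p q : a → Bool) :
    ws.any (fun w => p w || q w) = (ws.any p || ws.any q) := by
  induction ws with
  | nil => rfl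
  | cons w ws ih =>
    simp only [List.any_cons, ih]
    cases p w <;> cases q w <;> simp

-- the two ports agree on every lowered text
theorem scan_eq_loop (t : List Char) : aLoop hateWordsA t = bScan t := by
  induction t with
  | nil => decide
  | cons c rest ih =>
    rw [aLoop_eq_any] at ih ⊢
    simp only [bScan, ← ih, dispatch_eq_any]
    rw [show (fun w => PySem.Chars.isIn w (c :: rest))
          = fun w => (w.isPrefixOf (c :: rest) || PySem.Chars.isIn w rest)
        from funext fun w => isIn_cons w c rest]
    exact any_orB hateWordsA _ _

-- ===== VERDICT (by name: the statement is the Claim_ definition above) =====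
theorem rule_based_hate_spec : Claim_equal_rule_based_hate := by
  intro text _
  unfold Spec_rule_based_hate rule_based_hate rule_based_hate_alt
  exact scan_eq_loop _
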